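-- pv_equiv track=rewrite | github.com/aduerig/advent_of_code | 2022/20.py | build_new
-- ===== SOURCE A (Python) =====
-- def build_new(old_arr, move_ele, new_index):
--     curr = 0
--     new_arr = []
--     while curr < len(old_arr):
--         if old_arr[curr] == move_ele:
--             curr += 1
--             continue
--
--         if len(new_arr) == new_index:
--             new_arr.append(move_ele)
--
--         new_arr.append(old_arr[curr])
--         curr += 1
--     if len(new_arr) == new_index:
--         new_arr.append(move_ele)
--     return new_arr
-- ===== SOURCE B (Python) =====
-- def build_new(old_arr, move_ele, new_index):
--     filtered = [x for x in old_arr if x != move_ele]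
--     if 0 <= new_index <= len(filtered):
--         return filtered[:new_index] + [move_ele] + filtered[new_index:]
--     return filtered
-- ===== Notes on version B (the rewrite author's own statement) =====
-- stated objective: simpler
-- what changed: Replaces A's single interleaved filter-and-conditionally-insert loop with a plain filter comprehension followed by one slice-concatenation insertion (or none when new_index is out of range).
import Mathlib
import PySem

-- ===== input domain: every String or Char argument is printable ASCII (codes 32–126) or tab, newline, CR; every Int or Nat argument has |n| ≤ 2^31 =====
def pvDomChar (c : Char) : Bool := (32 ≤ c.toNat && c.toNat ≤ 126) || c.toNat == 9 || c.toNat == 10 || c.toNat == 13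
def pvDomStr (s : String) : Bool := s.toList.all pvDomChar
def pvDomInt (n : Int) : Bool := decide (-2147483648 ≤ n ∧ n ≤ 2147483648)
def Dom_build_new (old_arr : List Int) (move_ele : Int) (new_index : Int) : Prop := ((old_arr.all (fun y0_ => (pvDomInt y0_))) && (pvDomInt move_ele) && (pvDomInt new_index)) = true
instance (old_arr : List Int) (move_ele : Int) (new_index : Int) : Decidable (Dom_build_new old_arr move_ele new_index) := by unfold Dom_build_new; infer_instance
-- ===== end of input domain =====

-- B replaces A's interleaved filter-and-conditionally-insert loop by a filter pass plus one slice-concatenation insertion (objective: simpler).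


-- ===== PORT A =====
-- one loop-body step of A's while loop (old_arr[curr] = x)
def buildStep (move_ele new_index : Int) (new_arr : List Int) (x : Int) : List Int :=
  if x = move_ele then new_arr
  else
    let new_arr := if (new_arr.length : Int) = new_index then new_arr ++ [move_ele] else new_arr
    new_arr ++ [x]

def build_new (old_arr : List Int) (move_ele : Int) (new_index : Int) : List Int :=
  let new_arr := old_arr.foldl (buildStep move_ele new_index) []
  if (new_arr.length : Int) = new_index then new_arr ++ [move_ele] else new_arr

-- ===== PORT B =====
def build_new_alt (old_arr : List Int) (move_ele : Int) (new_index : Int) : List Int :=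
  let filtered := old_arr.filter (fun x => x != move_ele)
  if 0 ≤ new_index ∧ new_index ≤ (filtered.length : Int) then
    filtered.take new_index.toNat ++ move_ele :: filtered.drop new_index.toNat
  else filtered

-- ===== PRECONDITION & SPEC =====
def Spec_build_new (old_arr : List Int) (move_ele : Int) (new_index : Int) (out : List Int) : Prop := out = build_new_alt old_arr move_ele new_index
instance (old_arr : List Int) (move_ele : Int) (new_index : Int) (out : List Int) : Decidable (Spec_build_new old_arr move_ele new_index out) := by unfold Spec_build_new; infer_instance

-- ===== CLAIM (what is proved, stated in full; the proofs are below) =====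
def Claim_equal_build_new : Prop := ∀ (old_arr : List Int) (move_ele : Int) (new_index : Int), Dom_build_new old_arr move_ele new_index → Spec_build_new old_arr move_ele new_index (build_new old_arr move_ele new_index)

-- ===== LEMMAS AND PROOFS =====

-- the final "if len == new_index then append" of A
def finStep (move_ele new_index : Int) (l : List Int) : List Int :=
  if (l.length : Int) = new_index then l ++ [move_ele] else l

-- once the accumulator is longer than new_index, the trigger never fires again
theorem build_passed (m ni : Int) (l : List Int) :
    ∀ acc : List Int, ni < acc.length →
      finStep m ni (l.foldl (buildStep m ni) acc) = acc ++ l.filter (fun x => x != m) := by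
  induction l with
  | nil =>
      intro acc h
      simp [finStep]
      omega
  | cons x xs ih =>
      intro acc h
      by_cases hx : x = m
      · simp [List.foldl, buildStep, hx, ih acc h]
      · have : ((acc.length : Int)) ≠ ni := by omega
        simp [List.foldl, buildStep, hx, this]
        rw [ih (acc ++ [x]) (by simp; omega)]
        simp

-- while the accumulator is not longer than new_index, the loop inserts exactly at offset new_index - acc.length
theorem build_notyet (m ni : Int) (l : List Int) :
    ∀ acc : List Int, (acc.length : Int) ≤ ni →
      finStep m ni (l.foldl (buildStep m ni) acc) =
        (let f := l.filter (fun x => x != m)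
         if ni ≤ (acc.length : Int) + f.length then
           acc ++ f.take (ni - acc.length).toNat ++ m :: f.drop (ni - acc.length).toNat
         else acc ++ f) := by
  induction l with
  | nil =>
      intro acc h
      simp only [List.foldl, List.filter_nil, List.length_nil, finStep]
      split_ifs with h1 h2 h3 <;> simp_all <;> omega
  | cons x xs ih =>
      intro acc h
      by_cases hx : x = m
      · simpa [List.foldl, buildStep, hx] using ih acc h
      · have hf : List.filter (fun y => y != m) (x :: xs) = x :: List.filter (fun y => y != m) xs := by
          simp [hx]
        by_cases he : (acc.length : Int) = ni
        · simp only [List.foldl, buildStep, hx, if_pos he, reduceIte]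
          rw [build_passed m ni xs (acc ++ [m] ++ [x]) (by simp; omega)]
          have h0 : (ni - (acc.length : Int)).toNat = 0 := by omega
          simp [hf, he]
          omega
        · have hlt : (acc.length : Int) < ni := lt_of_le_of_ne h he
          simp only [List.foldl, buildStep, hx, if_neg he, reduceIte]
          rw [ih (acc ++ [x]) (by simp; omega)]
          simp only [hf, List.length_append, List.length_cons]
          have hd : (ni - (acc.length : Int)).toNat = (ni - ((acc ++ [x]).length : Int)).toNat + 1 := by
            simp; omega
          by_cases hc : ni ≤ (acc.length : Int) + 1 + ((xs.filter (fun y => y != m)).length : Int)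
          · rw [if_pos (by simp; omega), if_pos (by simp; omega)]
            simp [hd]
          · rw [if_neg (by simp; omega), if_neg (by simp; omega)]
            simp

-- ===== VERDICT (by name: the statement is the Claim_ definition above) =====
theorem build_new_spec : Claim_equal_build_new := by
  intro old_arr m ni _
  show build_new old_arr m ni = build_new_alt old_arr m ni
  by_cases hn : 0 ≤ ni
  · have := build_notyet m ni old_arr [] (by simpa using hn)
    simp only [List.length_nil, Int.natCast_zero, Int.sub_zero, List.nil_append] at this
    simp only [build_new, build_new_alt, finStep] at this ⊢
    rw [this]
    by_cases hc : ni ≤ ((old_arr.filter (fun x => x != m)).length : Int)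
    · rw [if_pos (by omega), if_pos ⟨hn, hc⟩]
    · rw [if_neg (by omega), if_neg (by intro ⟨_, h⟩; exact hc h)]
  · have := build_passed m ni old_arr [] (by simp; omega)
    simp only [List.nil_append] at this
    simp only [build_new, build_new_alt, finStep] at this ⊢
    rw [this, if_neg (by intro ⟨h, _⟩; exact hn h)]
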